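-- pv_equiv track=rewrite | github.com/kduvekot/ubl-gc | scripts/lib/gc_diff.py | _remove_column_from_block
-- ===== SOURCE A (Python) =====
-- from typing import Dict, List, Optional, OrderedDict
--
-- def _remove_column_from_block(block_lines: List[str], col_name: str) -> List[str]:
--     """Remove Value elements for a specific column from a row block"""
--     result = []
--     i = 0
--
--     while i < len(block_lines):
--         line = block_lines[i]
--
--         # Check if this line starts a Value element for the column to remove
--         if f'ColumnRef="{col_name}"' in line:
--             # Find the matching </Value> tag
--             if '</Value>' in line:
--                 # Single-line value, skip it
--                 i += 1
--                 continue
--             else: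
--                 # Multi-line value, skip until we find </Value>
--                 while i < len(block_lines) and '</Value>' not in block_lines[i]:
--                     i += 1
--                 # Skip the </Value> line too
--                 i += 1
--                 continue
--
--         result.append(line)
--         i += 1
--
--     return result
-- ===== SOURCE B (Python) =====
-- def _remove_column_from_block(block_lines, col_name):
--     """Remove Value elements for a specific column from a row block"""
--     marker = f'ColumnRef="{col_name}"'
--     n = len(block_lines)
--     # stage 1: index every line that closes a Value element
--     closes = [j for j, line in enumerate(block_lines) if '</Value>' in line]
--     # stage 2: the index ranges covered by Value elements of this column
--     ranges = []
--     for m, line in enumerate(block_lines):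
--         if marker not in line:
--             continue
--         if ranges and m <= ranges[-1][1]:
--             continue  # this match lies inside a range already scheduled for removal
--         end = next((j for j in closes if j >= m), n - 1)
--         ranges.append((m, end))
--     # stage 3: keep every line whose index lies in none of the ranges
--     return [line for i, line in enumerate(block_lines)
--             if not any(a <= i <= b for a, b in ranges)]
-- ===== Notes on version B (the rewrite author's own statement) =====
-- stated objective: alternative
-- what changed: A's interleaved index-driven while loop (with a nested skip-scan and the marker f-string re-evaluated on every line) is replaced by a staged range-detection algorithm: build the marker once, pre-index all '</Value>' lines, build the list of (start,end) removal ranges by pairing each surviving marker index with its first closing index, then reconstruct the output by filtering enumerate(lines) against the interval list.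
import Mathlib
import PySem

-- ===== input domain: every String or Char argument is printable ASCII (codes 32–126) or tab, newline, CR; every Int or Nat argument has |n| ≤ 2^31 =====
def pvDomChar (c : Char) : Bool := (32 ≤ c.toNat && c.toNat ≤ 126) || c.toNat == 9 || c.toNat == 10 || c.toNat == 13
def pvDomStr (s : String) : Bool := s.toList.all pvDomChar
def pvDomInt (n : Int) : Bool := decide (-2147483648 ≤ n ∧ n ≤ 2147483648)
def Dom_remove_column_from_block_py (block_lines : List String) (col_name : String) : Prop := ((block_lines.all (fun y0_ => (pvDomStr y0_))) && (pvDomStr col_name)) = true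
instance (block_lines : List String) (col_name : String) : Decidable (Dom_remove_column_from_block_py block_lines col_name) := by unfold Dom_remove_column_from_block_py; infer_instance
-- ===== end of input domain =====

-- B replaces A's interleaved index-driven while loop by staged passes: index the closing
-- lines, build the list of (start, end) removal ranges, then filter by interval cover;
-- objective: alternative (same task, different algorithm, similar cost).

-- ===== PORT A =====
-- inner while of A: advance past lines until (and including) the first one containing '</Value>'
def pvSkipClose (ls : List String) : List String :=
  match ls with
  | [] => []
  | l :: rest => if PySem.Str.isIn "</Value>" l then rest else pvSkipClose rest

theorem pvSkipClose_length_le (ls : List String) : (pvSkipClose ls).length ≤ ls.length := by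
  induction ls with
  | nil => simp [pvSkipClose]
  | cons l rest ih =>
    simp only [pvSkipClose]
    split
    · simp
    · exact le_trans ih (Nat.le_succ _)

-- outer while of A, on the remaining suffix of block_lines
def pvRunA (marker : String) (ls : List String) : List String :=
  match ls with
  | [] => []
  | l :: rest =>
    if PySem.Str.isIn marker l then
      if PySem.Str.isIn "</Value>" l then pvRunA marker rest
      else pvRunA marker (pvSkipClose rest)
    else l :: pvRunA marker rest
termination_by ls.length
decreasing_by
  · simp
  · simp only [List.length_cons]
    exact Nat.lt_succ_of_le (pvSkipClose_length_le rest)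
  · simp

def remove_column_from_block_py (block_lines : List String) (col_name : String) : List String :=
  pvRunA ("ColumnRef=\"" ++ col_name ++ "\"") block_lines

-- ===== PORT B =====
-- body of Source B's stage-2 loop: skip non-marker lines, skip matches already covered by the
-- last scheduled range, otherwise append the range (m, first closing index ≥ m, else n-1)
-- stage-1 comprehension of Source B: the indices of all lines containing '</Value>'
def pvClos (L : List String) : List Int :=
  ((PySem.List.enumerate L 0).filter (fun p => PySem.Str.isIn "</Value>" p.2)).map (fun p => p.1)

def pvStepB (closes : List Int) (n : Int) (marker : String)
    (rs : List (Int × Int)) (p : Int × String) : List (Int × Int) :=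
  if !(PySem.Str.isIn marker p.2) then rs
  else if rs.getLast?.elim false (fun r => decide (p.1 ≤ r.2)) then rs
  else rs ++ [(p.1, (closes.find? (fun j => decide (p.1 ≤ j))).getD (n - 1))]

def remove_column_from_block_py_alt (block_lines : List String) (col_name : String) : List String :=
  let marker := "ColumnRef=\"" ++ col_name ++ "\""
  let n : Int := block_lines.length
  let closes : List Int := pvClos block_lines
  let ranges := (PySem.List.enumerate block_lines 0).foldl (pvStepB closes n marker) []
  ((PySem.List.enumerate block_lines 0).filter
      (fun p => !(ranges.any (fun r => decide (r.1 ≤ p.1) && decide (p.1 ≤ r.2))))).map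
    (fun p => p.2)

-- ===== PRECONDITION & SPEC =====
def Spec_remove_column_from_block_py (block_lines : List String) (col_name : String) (out : List String) : Prop := out = remove_column_from_block_py_alt block_lines col_name
instance (block_lines : List String) (col_name : String) (out : List String) : Decidable (Spec_remove_column_from_block_py block_lines col_name out) := by unfold Spec_remove_column_from_block_py; infer_instance

-- ===== CLAIM (what is proved, stated in full; the proofs are below) =====
def Claim_equal_remove_column_from_block_py : Prop := ∀ (block_lines : List String) (col_name : String), Dom_remove_column_from_block_py block_lines col_name → Spec_remove_column_from_block_py block_lines col_name (remove_column_from_block_py block_lines col_name)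

-- ===== LEMMAS AND PROOFS =====

-- per-index predicates: line k matches the marker / contains the closing tag
def pvP (marker : String) (L : List String) (k : Nat) : Bool :=
  PySem.Str.isIn marker (L.getD k "")
def pvC (L : List String) (k : Nat) : Bool :=
  PySem.Str.isIn "</Value>" (L.getD k "")

-- first index ≥ m whose line contains '</Value>'
def pvFC (L : List String) (m : Nat) : Option Nat :=
  if h : m < L.length then (if pvC L m then some m else pvFC L (m + 1)) else none
termination_by L.length - m

-- the end of the removal range starting at m (n-1 when unclosed)
def pvE (L : List String) (m : Nat) : Nat := (pvFC L m).getD (L.length - 1)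

theorem pvFC_some_ge (L : List String) (m j : Nat) (h : pvFC L m = some j) :
    m ≤ j ∧ j < L.length := by
  rw [pvFC] at h
  split at h
  · split at h
    · cases h; omega
    · have := pvFC_some_ge L (m + 1) j h; omega
  · cases h
termination_by L.length - m

theorem pvE_ge (L : List String) (m : Nat) (h : m < L.length) : m ≤ pvE L m := by
  unfold pvE
  cases hfc : pvFC L m with
  | none => simp; omega
  | some j => have := pvFC_some_ge L m j hfc; simp; omega

theorem pvE_lt (L : List String) (m : Nat) (h : m < L.length) : pvE L m < L.length := by
  unfold pvE
  cases hfc : pvFC L m with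
  | none => simp; omega
  | some j => have := pvFC_some_ge L m j hfc; simp; omega

-- the common functional spec: the kept lines from position k onward
def pvSpec (marker : String) (L : List String) (k : Nat) : List String :=
  if h : k < L.length then
    (if pvP marker L k then pvSpec marker L (pvE L k + 1)
     else L[k] :: pvSpec marker L (k + 1))
  else []
termination_by L.length - k
decreasing_by
  · have := pvE_ge L k h; omega
  · omega

-- B's removal ranges from position k onward
def pvRF (marker : String) (L : List String) (k : Nat) : List (Int × Int) :=
  if h : k < L.length then
    (if pvP marker L k then
       ((k : Int), ((pvE L k : Nat) : Int)) :: pvRF marker L (pvE L k + 1)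
     else pvRF marker L (k + 1))
  else []
termination_by L.length - k
decreasing_by
  · have := pvE_ge L k h; omega
  · omega

theorem pvRF_bounds (marker : String) (L : List String) (k : Nat) :
    ∀ r ∈ pvRF marker L k, (k : Int) ≤ r.1 ∧ r.1 ≤ r.2 ∧ r.2 < (L.length : Int) := by
  intro r hr
  rw [pvRF] at hr
  split at hr
  · rename_i hk
    have he1 := pvE_ge L k hk
    have he2 := pvE_lt L k hk
    split at hr
    · rcases List.mem_cons.1 hr with h | h
      · subst h; refine ⟨le_refl _, ?_, ?_⟩ <;> · push_cast; omega
      · have := pvRF_bounds marker L (pvE L k + 1) r h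
        refine ⟨?_, this.2.1, this.2.2⟩
        have := this.1; push_cast at this ⊢; omega
    · have := pvRF_bounds marker L (k + 1) r hr
      refine ⟨?_, this.2.1, this.2.2⟩
      have := this.1; push_cast at this ⊢; omega
  · cases hr
termination_by L.length - k
decreasing_by
  · have := pvE_ge L k (by assumption); omega
  · omega

theorem pvRF_nil (marker : String) (L : List String) (k : Nat) (h : L.length ≤ k) :
    pvRF marker L k = [] := by
  rw [pvRF, dif_neg (by omega)]

theorem pvRF_succ (marker : String) (L : List String) (k : Nat)
    (h : pvP marker L k = false) : pvRF marker L k = pvRF marker L (k + 1) := by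
  rw [pvRF]
  split
  · rw [if_neg (by simp [h])]
  · rw [pvRF_nil marker L (k + 1) (by omega)]

-- ===== A-side characterization =====
theorem skipClose_drop (L : List String) (m : Nat) :
    pvSkipClose (L.drop m) = L.drop (pvE L m + 1) := by
  by_cases hm : m < L.length
  · rw [(List.drop_eq_getElem_cons hm).symm.symm]
    rw [pvSkipClose]
    have hCm : pvC L m = PySem.Str.isIn "</Value>" L[m] := by
      unfold pvC; rw [List.getD_eq_getElem L "" hm]
    by_cases hc : pvC L m
    · rw [if_pos (by rw [← hCm]; exact hc)]
      have : pvE L m = m := by unfold pvE; rw [pvFC, dif_pos hm, if_pos hc]; rfl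
      rw [this]
    · rw [if_neg (by rw [← hCm]; simpa using hc)]
      have heq : pvE L m = pvE L (m + 1) := by
        unfold pvE; rw [pvFC, dif_pos hm, if_neg hc]
      rw [heq]
      exact skipClose_drop L (m + 1)
  · rw [List.drop_eq_nil_of_le (by omega)]
    rw [List.drop_eq_nil_of_le, pvSkipClose]
    have : pvE L m = L.length - 1 := by
      unfold pvE; rw [pvFC, dif_neg hm]; rfl
    omega
termination_by L.length - m

theorem runA_spec (marker : String) (L : List String) (k : Nat) :
    pvRunA marker (L.drop k) = pvSpec marker L k := by
  by_cases hk : k < L.length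
  · have hE1 := pvE_ge L k hk
    have hd : L.drop k = L[k] :: L.drop (k + 1) := List.drop_eq_getElem_cons hk
    have hPk : pvP marker L k = PySem.Str.isIn marker L[k] := by
      unfold pvP; rw [List.getD_eq_getElem L "" hk]
    have hCk : pvC L k = PySem.Str.isIn "</Value>" L[k] := by
      unfold pvC; rw [List.getD_eq_getElem L "" hk]
    have hEk1 : k ≤ pvE L (k + 1) := by
      by_cases h1 : k + 1 < L.length
      · have := pvE_ge L (k + 1) h1; omega
      · have : pvE L (k + 1) = L.length - 1 := by
          unfold pvE; rw [pvFC, dif_neg h1]; rfl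
        omega
    rw [hd, pvRunA, pvSpec, dif_pos hk]
    by_cases hp : pvP marker L k
    · rw [if_pos (by rw [← hPk]; exact hp), if_pos hp]
      by_cases hc : pvC L k
      · rw [if_pos (by rw [← hCk]; exact hc)]
        have : pvE L k = k := by unfold pvE; rw [pvFC, dif_pos hk, if_pos hc]; rfl
        rw [this]
        exact runA_spec marker L (k + 1)
      · rw [if_neg (by rw [← hCk]; simpa using hc)]
        have heq : pvE L k = pvE L (k + 1) := by
          unfold pvE; rw [pvFC, dif_pos hk, if_neg hc]
        rw [skipClose_drop L (k + 1), heq]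
        exact runA_spec marker L (pvE L (k + 1) + 1)
    · rw [if_neg (by rw [← hPk]; simpa using hp), if_neg (by simpa using hp)]
      rw [runA_spec marker L (k + 1)]
  · rw [List.drop_eq_nil_of_le (by omega), pvRunA, pvSpec, dif_neg hk]
termination_by L.length - k
decreasing_by all_goals omega

-- ===== B-side characterization =====
-- first closing index within xs, xs starting at absolute index s
def pvFcl (xs : List String) (s : Nat) : Option Nat :=
  match xs with
  | [] => none
  | x :: t => if PySem.Str.isIn "</Value>" x then some s else pvFcl t (s + 1)

-- the closes comprehension over a suffix starting at absolute index s
def pvClosG (xs : List String) (s : Int) : List Int :=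
  ((PySem.List.enumerate xs s).filter (fun p => PySem.Str.isIn "</Value>" p.2)).map (fun p => p.1)

theorem pvClosG_cons (x : String) (t : List String) (s : Int) :
    pvClosG (x :: t) s =
      (if PySem.Str.isIn "</Value>" x then [s] else []) ++ pvClosG t (s + 1) := by
  simp only [pvClosG, PySem.List.enumerate_cons, List.filter_cons, PySem.Str.isIn]
  split <;> simp

theorem clos_find_aux (xs : List String) (s m : Nat) (hms : m ≤ s) :
    (pvClosG xs (s : Int)).find? (fun j => decide ((m : Int) ≤ j)) =
      (pvFcl xs s).map (fun j => (j : Int)) := by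
  induction xs generalizing s with
  | nil => simp [pvClosG, pvFcl, PySem.List.enumerate_nil]
  | cons x t ih =>
    rw [pvClosG_cons, pvFcl]
    by_cases hc : PySem.Str.isIn "</Value>" x
    · rw [if_pos hc, if_pos hc]
      have hle : ((m : Int) ≤ (s : Int)) := by exact_mod_cast hms
      rw [List.singleton_append, List.find?_cons_of_pos (by simpa using hle)]
      simp
    · rw [if_neg hc, if_neg hc, List.nil_append]
      have hcast : ((s : Int) + 1) = ((s + 1 : Nat) : Int) := by push_cast; ring
      rw [hcast]
      exact ih (s + 1) (by omega)

theorem pvFcl_drop (L : List String) (s : Nat) : pvFcl (L.drop s) s = pvFC L s := by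
  by_cases hs : s < L.length
  · rw [List.drop_eq_getElem_cons hs, pvFcl, pvFC, dif_pos hs]
    have hCs : pvC L s = PySem.Str.isIn "</Value>" L[s] := by
      unfold pvC; rw [List.getD_eq_getElem L "" hs]
    by_cases hc : pvC L s
    · rw [if_pos (by rw [← hCs]; exact hc), if_pos hc]
    · rw [if_neg (by rw [← hCs]; simpa using hc), if_neg hc]
      exact pvFcl_drop L (s + 1)
  · rw [List.drop_eq_nil_of_le (by omega), pvFcl, pvFC, dif_neg hs]
termination_by L.length - s

theorem pvClosG_mem (xs : List String) (s : Int) (j : Int) (hj : j ∈ pvClosG xs s) :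
    s ≤ j ∧ j < s + xs.length := by
  simp only [pvClosG, List.mem_map, List.mem_filter] at hj
  obtain ⟨p, ⟨hp, _⟩, hj⟩ := hj
  rw [PySem.List.mem_enumerate_iff] at hp
  obtain ⟨i, hi, rfl⟩ := hp
  subst hj; push_cast; constructor <;> omega

theorem clos_find (L : List String) (m : Nat) (hm : m < L.length) :
    (pvClos L).find? (fun j => decide ((m : Int) ≤ j)) = (pvFC L m).map (fun j => (j : Int)) := by
  have hsplit : pvClos L = pvClosG (L.take m) 0 ++ pvClosG (L.drop m) (m : Int) := by
    have h1 : L = L.take m ++ L.drop m := (List.take_append_drop m L).symm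
    have hlen : (L.take m).length = m := by simp; omega
    unfold pvClos pvClosG
    conv_lhs => rw [h1]
    rw [PySem.List.enumerate_append]
    simp [List.filter_append, hlen]
  rw [hsplit, List.find?_append]
  have hnone : (pvClosG (L.take m) 0).find? (fun j => decide ((m : Int) ≤ j)) = none := by
    rw [List.find?_eq_none]
    intro j hj
    have := pvClosG_mem _ _ _ hj
    have hlen : ((L.take m).length : Int) ≤ (m : Int) := by simp
    simp only [decide_eq_true_eq, not_le]
    omega
  rw [hnone, Option.none_or, clos_find_aux (L.drop m) m m (le_refl m), pvFcl_drop]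

def pvEnumFrom (L : List String) (k : Nat) : List (Int × String) :=
  PySem.List.enumerate (L.drop k) (k : Int)

theorem pvEnumFrom_cons (L : List String) (k : Nat) (hk : k < L.length) :
    pvEnumFrom L k = (((k : Nat) : Int), L[k]) :: pvEnumFrom L (k + 1) := by
  unfold pvEnumFrom
  rw [List.drop_eq_getElem_cons hk, PySem.List.enumerate_cons]
  have h1 : ((k : Nat) : Int) + 1 = (((k + 1 : Nat)) : Int) := by push_cast; ring
  rw [h1]

theorem fold_inv (marker : String) (L : List String) (k : Nat) (rs : List (Int × Int)) (E : Nat)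
    (hinv : (rs.getLast? = none ∧ E = 0) ∨
      (∃ r, rs.getLast? = some r ∧ r.2 = (E : Int) - 1 ∧ 1 ≤ E)) :
    (pvEnumFrom L k).foldl (pvStepB (pvClos L) (L.length : Int) marker) rs =
      rs ++ pvRF marker L (max k E) := by
  by_cases hk : k < L.length
  · rw [pvEnumFrom_cons L k hk, List.foldl_cons]
    have hPk : pvP marker L k = PySem.Str.isIn marker L[k] := by
      unfold pvP; rw [List.getD_eq_getElem L "" hk]
    have hEge := pvE_ge L k hk
    have hend : ((pvClos L).find? (fun j => decide (((k : Int)) ≤ j))).getD ((L.length : Int) - 1)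
        = ((pvE L k : Nat) : Int) := by
      rw [clos_find L k hk]
      cases hfc : pvFC L k with
      | some j => simp [pvE, hfc]
      | none => simp [pvE, hfc]; omega
    by_cases hp : pvP marker L k
    · have hRFk : pvRF marker L k = ((k : Int), ((pvE L k : Nat) : Int)) :: pvRF marker L (pvE L k + 1) := by
        rw [pvRF, dif_pos hk, if_pos hp]
      rcases hinv with ⟨hnone, hE0⟩ | ⟨r, hlast, hr2, hE1⟩
      · have hstep : pvStepB (pvClos L) (L.length : Int) marker rs ((k : Int), L[k])
            = rs ++ [((k : Int), ((pvE L k : Nat) : Int))] := by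
          unfold pvStepB
          rw [if_neg (by rw [← hPk]; simp [hp])]
          rw [hnone]
          simp only [Option.elim_none, Bool.false_eq_true, if_false]
          rw [hend]
        rw [hstep, fold_inv marker L (k + 1) _ (pvE L k + 1)
          (Or.inr ⟨_, List.getLast?_concat, by push_cast; omega, by omega⟩)]
        subst hE0
        rw [show max (k + 1) (pvE L k + 1) = pvE L k + 1 by omega, show max k 0 = k by omega]
        rw [List.append_assoc, hRFk, List.singleton_append]
      · by_cases hg : (k : Int) ≤ r.2
        · have hstep : pvStepB (pvClos L) (L.length : Int) marker rs ((k : Int), L[k]) = rs := by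
            unfold pvStepB
            rw [if_neg (by rw [← hPk]; simp [hp])]
            rw [hlast]
            simp only [Option.elim_some]
            rw [if_pos (by simpa using hg)]
          rw [hstep, fold_inv marker L (k + 1) rs E (Or.inr ⟨r, hlast, hr2, hE1⟩)]
          have hkE : k + 1 ≤ E := by rw [hr2] at hg; omega
          rw [show max (k + 1) E = E by omega, show max k E = E by omega]
        · have hEk : E ≤ k := by rw [hr2] at hg; omega
          have hstep : pvStepB (pvClos L) (L.length : Int) marker rs ((k : Int), L[k])
              = rs ++ [((k : Int), ((pvE L k : Nat) : Int))] := by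
            unfold pvStepB
            rw [if_neg (by rw [← hPk]; simp [hp])]
            rw [hlast]
            simp only [Option.elim_some]
            rw [if_neg (by simpa using hg)]
            rw [hend]
          rw [hstep, fold_inv marker L (k + 1) _ (pvE L k + 1)
            (Or.inr ⟨_, List.getLast?_concat, by push_cast; omega, by omega⟩)]
          rw [show max (k + 1) (pvE L k + 1) = pvE L k + 1 by omega, show max k E = k by omega]
          rw [List.append_assoc, hRFk, List.singleton_append]
    · have hstep : pvStepB (pvClos L) (L.length : Int) marker rs ((k : Int), L[k]) = rs := by
        unfold pvStepB
        rw [if_pos (by rw [← hPk]; simp [hp])]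
      rw [hstep, fold_inv marker L (k + 1) rs E hinv]
      congr 1
      by_cases hE : k + 1 ≤ E
      · rw [show max (k + 1) E = max k E by omega]
      · rw [show max k E = k by omega, show max (k + 1) E = k + 1 by omega,
          ← pvRF_succ marker L k (by simpa using hp)]
  · unfold pvEnumFrom
    rw [List.drop_eq_nil_of_le (by omega)]
    simp [PySem.List.enumerate_nil, pvRF_nil marker L (max k E) (by omega)]
termination_by L.length - k
decreasing_by all_goals omega

theorem filter_spec (marker : String) (L : List String) (k : Nat) (pre : List (Int × Int))
    (hpre : ∀ r ∈ pre, r.2 < (k : Int)) :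
    ((pvEnumFrom L k).filter
        (fun p => !((pre ++ pvRF marker L k).any
          (fun r => decide (r.1 ≤ p.1) && decide (p.1 ≤ r.2))))).map (fun p => p.2) =
      pvSpec marker L k := by
  by_cases hk : k < L.length
  · have hPk : pvP marker L k = PySem.Str.isIn marker L[k] := by
      unfold pvP; rw [List.getD_eq_getElem L "" hk]
    by_cases hp : pvP marker L k
    · have hEge := pvE_ge L k hk
      have hElt := pvE_lt L k hk
      have hRFk : pvRF marker L k
          = ((k : Int), ((pvE L k : Nat) : Int)) :: pvRF marker L (pvE L k + 1) := by
        rw [pvRF, dif_pos hk, if_pos hp]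
      have hsplit : pvEnumFrom L k =
          PySem.List.enumerate ((L.drop k).take (pvE L k + 1 - k)) (k : Int)
            ++ pvEnumFrom L (pvE L k + 1) := by
        unfold pvEnumFrom
        conv_lhs => rw [show L.drop k
          = (L.drop k).take (pvE L k + 1 - k) ++ (L.drop k).drop (pvE L k + 1 - k) from
          (List.take_append_drop _ _).symm]
        rw [PySem.List.enumerate_append, List.drop_drop,
          show k + (pvE L k + 1 - k) = pvE L k + 1 by omega]
        have hlen : (List.take (pvE L k + 1 - k) (List.drop k L)).length = pvE L k + 1 - k := by
          rw [List.length_take, List.length_drop]; omega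
        rw [hlen, show (k : Int) + ((pvE L k + 1 - k : Nat) : Int) = (((pvE L k + 1 : Nat)) : Int) from by omega]
      rw [hsplit, List.filter_append, List.map_append]
      have hseg : List.filter
          (fun p => !((pre ++ pvRF marker L k).any
            (fun r => decide (r.1 ≤ p.1) && decide (p.1 ≤ r.2))))
          (PySem.List.enumerate ((L.drop k).take (pvE L k + 1 - k)) (k : Int)) = [] := by
        rw [List.filter_eq_nil_iff]
        intro p hpmem
        rw [PySem.List.mem_enumerate_iff] at hpmem
        obtain ⟨i, hi, rfl⟩ := hpmem
        have hil : i < pvE L k + 1 - k := by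
          have := List.length_take_le (pvE L k + 1 - k) (L.drop k); omega
        simp only [Bool.not_eq_true, Bool.not_eq_false', List.any_eq_true]
        refine ⟨((k : Int), ((pvE L k : Nat) : Int)), ?_, ?_⟩
        · rw [hRFk]; exact List.mem_append_right _ (List.mem_cons_self)
        · simp only [Bool.and_eq_true, decide_eq_true_eq]
          exact ⟨by omega, by omega⟩
      rw [hseg, List.map_nil, List.nil_append]
      rw [hRFk, List.append_cons]
      rw [filter_spec marker L (pvE L k + 1) (pre ++ [((k : Int), ((pvE L k : Nat) : Int))])
        (by
          intro r hr
          rcases List.mem_append.1 hr with h | h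
          · have := hpre r h; push_cast; omega
          · simp at h; rw [h]; push_cast; omega)]
      rw [show pvSpec marker L k = pvSpec marker L (pvE L k + 1) from by
        rw [pvSpec, dif_pos hk, if_pos hp]]
    · rw [pvEnumFrom_cons L k hk, List.filter_cons]
      have hRF : pvRF marker L k = pvRF marker L (k + 1) :=
        pvRF_succ marker L k (by simpa using hp)
      have hpred : (!((pre ++ pvRF marker L k).any
          (fun r => decide (r.1 ≤ (((k : Nat)) : Int)) && decide ((((k : Nat)) : Int) ≤ r.2)))) = true := by
        rw [hRF]
        simp only [Bool.not_eq_true', List.any_eq_false]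
        intro r hr
        rcases List.mem_append.1 hr with h | h
        · have h2 := hpre r h
          have hno : ¬ (((k : Nat) : Int) ≤ r.2) := by omega
          simp [hno]
        · obtain ⟨h1, _, _⟩ := pvRF_bounds marker L (k + 1) r h
          have hno : ¬ (r.1 ≤ ((k : Nat) : Int)) := by push_cast at h1; omega
          simp [hno]
      rw [if_pos hpred, List.map_cons]
      rw [pvSpec, dif_pos hk, if_neg (by simpa using hp)]
      congr 1
      rw [hRF]
      exact filter_spec marker L (k + 1) pre (fun r hr => by have := hpre r hr; omega)
  · unfold pvEnumFrom
    rw [List.drop_eq_nil_of_le (by omega)]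
    rw [pvSpec, dif_neg hk]
    simp [PySem.List.enumerate_nil]
termination_by L.length - k
decreasing_by all_goals omega

-- ===== VERDICT (by name: the statement is the Claim_ definition above) =====
theorem remove_column_from_block_py_spec : Claim_equal_remove_column_from_block_py := by
  intro L c _
  simp only [Spec_remove_column_from_block_py, remove_column_from_block_py,
    remove_column_from_block_py_alt]
  rw [show PySem.List.enumerate L 0 = pvEnumFrom L 0 from by
    unfold pvEnumFrom; rw [List.drop_zero]; norm_num]
  rw [fold_inv ("ColumnRef=\"" ++ c ++ "\"") L 0 [] 0 (Or.inl ⟨rfl, rfl⟩)]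
  have hfil := filter_spec ("ColumnRef=\"" ++ c ++ "\"") L 0 [] (by simp)
  simp only [List.nil_append, Nat.max_self] at hfil ⊢
  rw [hfil]
  have h0 := runA_spec ("ColumnRef=\"" ++ c ++ "\"") L 0
  rwa [List.drop_zero] at h0
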